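-- pv_equiv track=rewrite | github.com/yydaily/project-euler-solution | code/169/solution.py | solve
-- ===== SOURCE A (Python) =====
-- cache = {}
--
-- def solve(a):
--     if a <= 0:
--         return 1
--     if a in cache:
--         return cache[a]
--     ret = 0
--     if (a & 1) == 1:
--         ret = solve(a >> 1)
--     else:
--         ret = solve(a >> 1) + solve((a >> 1) - 1)
--     cache[a] = ret
--     return ret
-- ===== SOURCE B (Python) =====
-- def solve(a):
--     if a <= 0:
--         return 1
--     n = a + 1
--     p, q = 1, 0
--     while n > 0:
--         if n & 1:
--             q += p
--         else:
--             p += q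
--         n >>= 1
--     return q
-- ===== Notes on version B (the rewrite author's own statement) =====
-- stated objective: alternative
-- what changed: Replaces the memoized binary recursion with the iterative Stern/fusc bit-scan identity solve(a)=fusc(a+1): one loop over the bits of a+1 with two accumulators, no cache, no recursion, O(1) extra space.
import Mathlib
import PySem

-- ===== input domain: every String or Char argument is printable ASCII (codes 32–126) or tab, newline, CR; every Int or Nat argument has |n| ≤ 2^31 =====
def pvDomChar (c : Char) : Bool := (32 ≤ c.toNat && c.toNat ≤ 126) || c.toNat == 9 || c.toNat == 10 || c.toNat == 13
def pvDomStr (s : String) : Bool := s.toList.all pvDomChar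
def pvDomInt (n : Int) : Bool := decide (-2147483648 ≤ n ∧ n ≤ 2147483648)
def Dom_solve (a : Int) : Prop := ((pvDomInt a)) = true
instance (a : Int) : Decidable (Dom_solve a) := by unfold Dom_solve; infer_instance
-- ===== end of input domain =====

-- B replaces A's memoized binary recursion by the iterative fusc bit-scan (solve(a)=fusc(a+1)):
-- one loop over the bits with two accumulators, no cache. (A's module-level cache is a pure memo;
-- this file ports the pure recursion, which returns the same values.)

theorem pv_shiftRight_toNat_lt (a : Int) (h : 0 < a) : (a >>> (1:Nat)).toNat < a.toNat := by
  have : a >>> (1:Nat) = a / 2 := by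
    simp [Int.shiftRight_eq_div_pow]
  rw [this]; omega

-- ===== PORT A =====
def solve (a : Int) : Int :=
  if 0 < a then
    if PySem.Int.band a 1 = 1 then solve (a >>> (1:Nat))
    else solve (a >>> (1:Nat)) + solve ((a >>> (1:Nat)) - 1)
  else 1
termination_by a.toNat
decreasing_by
  · exact pv_shiftRight_toNat_lt a (by assumption)
  · exact pv_shiftRight_toNat_lt a (by assumption)
  · have := pv_shiftRight_toNat_lt a (by assumption); omega

-- ===== PORT B =====
def fuscLoop (n p q : Int) : Int :=
  if 0 < n then
    if PySem.Int.band n 1 ≠ 0 then fuscLoop (n >>> (1:Nat)) p (q + p)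
    else fuscLoop (n >>> (1:Nat)) (p + q) q
  else q
termination_by n.toNat
decreasing_by
  · exact pv_shiftRight_toNat_lt n (by assumption)
  · exact pv_shiftRight_toNat_lt n (by assumption)

def solve_alt (a : Int) : Int :=
  if a ≤ 0 then 1
  else fuscLoop (a + 1) 1 0

-- ===== PRECONDITION & SPEC =====
def Spec_solve (a : Int) (out : Int) : Prop := out = solve_alt a
instance (a : Int) (out : Int) : Decidable (Spec_solve a out) := by unfold Spec_solve; infer_instance

-- ===== CLAIM (what is proved, stated in full; the proofs are below) =====
def Claim_equal_solve : Prop := ∀ (a : Int), Dom_solve a → Spec_solve a (solve a)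

-- ===== LEMMAS AND PROOFS =====

-- Stern's diatomic sequence (fusc), the mathematical object both programs compute.
def fusc : Nat → Int
  | 0 => 0
  | 1 => 1
  | (n+2) =>
    if (n+2) % 2 = 0 then fusc ((n+2)/2)
    else fusc ((n+2)/2) + fusc ((n+2)/2 + 1)
decreasing_by all_goals omega

theorem fusc_even (m : Nat) (h : 0 < m) : fusc (2*m) = fusc m := by
  obtain ⟨k, rfl⟩ : ∃ k, m = k + 1 := ⟨m - 1, by omega⟩
  show fusc (2*k+2) = _
  rw [fusc, if_pos (show (2*k+2) % 2 = 0 by omega), show (2*k+2)/2 = k+1 by omega]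

theorem fusc_odd (m : Nat) : fusc (2*m+1) = fusc m + fusc (m+1) := by
  match m with
  | 0 => simp [fusc]
  | k+1 =>
    show fusc ((2*k+1)+2) = _
    rw [fusc, if_neg (show ¬((2*k+1)+2) % 2 = 0 by omega), show ((2*k+1)+2)/2 = k+1 by omega]

theorem shiftRight_one_natCast (m : Nat) : ((m:Int) >>> (1:Nat)) = ((m/2 : Nat) : Int) := by
  have : (m:Int) >>> (1:Nat) = (m:Int) / 2 := by simp [Int.shiftRight_eq_div_pow]
  rw [this]; omega

theorem band_one_natCast (m : Nat) : PySem.Int.band (m:Int) 1 = ((m % 2 : Nat) : Int) := by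
  rw [PySem.Int.band_one]
  exact_mod_cast PySem.Int.mod_natCast m 2

-- loop invariant: fuscLoop n p q = p * fusc n + q * fusc (n+1)
theorem fuscLoop_eq (m : Nat) : ∀ p q : Int, fuscLoop (m:Int) p q = p * fusc m + q * fusc (m+1) := by
  induction m using Nat.strong_induction_on with
  | _ m ih =>
    intro p q
    rw [fuscLoop]
    by_cases hm : 0 < m
    · rw [if_pos (by exact_mod_cast hm), shiftRight_one_natCast, band_one_natCast]
      by_cases hodd : m % 2 = 1
      · obtain ⟨k, rfl⟩ : ∃ k, m = 2*k+1 := ⟨m/2, by omega⟩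
        rw [show (2*k+1)/2 = k by omega, if_pos (by simp), ih k (by omega),
            fusc_odd, show 2*k+1+1 = 2*(k+1) by ring, fusc_even _ (by omega)]
        ring
      · obtain ⟨k, rfl⟩ : ∃ k, m = 2*k := ⟨m/2, by omega⟩
        rw [show (2*k)/2 = k by omega, if_neg (by simp [Nat.mul_mod_right]),
            ih k (by omega), fusc_even _ (by omega), fusc_odd]
        ring
    · have : m = 0 := by omega
      subst this
      rw [if_neg (by norm_num)]
      simp [fusc]

-- A computes fusc (a+1) on naturals
theorem solve_eq_fusc (m : Nat) : solve (m:Int) = fusc (m+1) := by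
  induction m using Nat.strong_induction_on with
  | _ m ih =>
    rw [solve]
    by_cases hm : 0 < m
    · rw [if_pos (by exact_mod_cast hm), shiftRight_one_natCast, band_one_natCast]
      by_cases hodd : m % 2 = 1
      · obtain ⟨k, rfl⟩ : ∃ k, m = 2*k+1 := ⟨m/2, by omega⟩
        rw [show (2*k+1)/2 = k by omega, if_pos (by norm_num), ih k (by omega),
            show 2*k+1+1 = 2*(k+1) by ring, fusc_even _ (by omega)]
      · obtain ⟨k, rfl⟩ : ∃ k, m = 2*k := ⟨m/2, by omega⟩
        have hk : 0 < k := by omega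
        rw [show (2*k)/2 = k by omega, if_neg (by simp [Nat.mul_mod_right]),
            show ((k : Nat) : Int) - 1 = ((k - 1 : Nat) : Int) by omega,
            ih k (by omega), ih (k-1) (by omega),
            show 2*k+1 = 2*k+1 from rfl, fusc_odd, show k-1+1 = k by omega]
        ring
    · have : m = 0 := by omega
      subst this
      rw [if_neg (by norm_num)]
      simp [fusc]

-- ===== VERDICT (by name: the statement is the Claim_ definition above) =====
theorem solve_spec : Claim_equal_solve := by
  intro a _
  unfold Spec_solve solve_alt
  by_cases h : a ≤ 0
  · rw [if_pos h, solve, if_neg (by omega)]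
  · rw [if_neg h]
    have ha : 0 < a := by omega
    obtain ⟨m, rfl⟩ : ∃ m : Nat, a = (m:Int) := ⟨a.toNat, by omega⟩
    rw [show (m:Int) + 1 = ((m+1 : Nat) : Int) by push_cast; ring,
        fuscLoop_eq, solve_eq_fusc]
    ring
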